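-- pv_equiv track=rewrite | github.com/Zekai-Zhao775/LeetCode | Juejin/100. 统计班级中的说谎者.py | solution
-- ===== SOURCE A (Python) =====
-- def solution(A):
--     # Edit your code here
--     len_A = len(A)
--     A.sort()  # 1 - 100
--
--     if len_A % 2 == 0:
--         liar = int(len_A / 2)
--         last_score = A[int(len_A / 2)]
--         i = int(len_A / 2) - 1
--         while i >= 0:
--             if A[i] == last_score:
--                 liar += 1
--             i -= 1
--
--         return liar
--
--     if len_A % 2 != 0:
--         liar = int(len_A / 2)
--         last_score = A[int(len_A / 2)]
--         i = int(len_A / 2)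
--         while i >= 0:
--             if A[i] == last_score:
--                 liar += 1
--             i -= 1
--         return liar
-- ===== SOURCE B (Python) =====
-- def solution(A):
--     # One pass builds a frequency dict; walking its sorted keys finds the median
--     # value v and the number of scores below it, so the answer is n - (#scores < v).
--     n = len(A)
--     m = n // 2
--     cnt = {}
--     for x in A:
--         cnt[x] = cnt.get(x, 0) + 1
--     cum = 0
--     for v in sorted(cnt):
--         if cum + cnt[v] > m:
--             return n - cum
--         cum += cnt[v]
-- ===== Notes on version B (the rewrite author's own statement) =====
-- stated objective: alternative
-- what changed: B replaces the sort-then-backward-scan with parity-split branches by a single frequency dict built in one pass plus a walk over its sorted distinct keys, returning n minus the number of scores below the median value in one unified formula.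
import Mathlib
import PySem

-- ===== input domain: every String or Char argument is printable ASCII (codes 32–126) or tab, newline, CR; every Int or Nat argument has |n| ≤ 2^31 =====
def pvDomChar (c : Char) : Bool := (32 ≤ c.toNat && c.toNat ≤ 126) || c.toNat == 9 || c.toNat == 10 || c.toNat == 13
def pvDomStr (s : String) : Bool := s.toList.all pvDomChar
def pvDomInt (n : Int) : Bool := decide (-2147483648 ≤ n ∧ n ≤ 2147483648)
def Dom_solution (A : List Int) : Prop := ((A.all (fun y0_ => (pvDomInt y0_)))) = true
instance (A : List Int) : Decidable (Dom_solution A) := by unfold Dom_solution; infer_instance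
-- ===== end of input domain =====

-- B builds a frequency dict and walks its sorted keys instead of sorting and scanning backwards;
-- A sorts its argument in place (the equivalence proved here is about the return value only).

-- ===== PORT A =====
-- the while loop 'while i >= 0: if A[i] == last_score: liar += 1; i -= 1', started at index i
def solutionLoopA (S : List Int) (v : Int) : Nat → Int → Int
  | 0, liar => if PySem.List.pyGet? S (0 : Int) = some v then liar + 1 else liar
  | i+1, liar =>
      solutionLoopA S v i (if PySem.List.pyGet? S ((i : Int) + 1) = some v then liar + 1 else liar)

def solution (A : List Int) : Int :=
  let lenA := A.length
  let S := PySem.List.sorted A (fun x => x) false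
  if lenA % 2 == 0 then
    let m := lenA / 2
    match PySem.List.pyGet? S (m : Int) with
    | none => 0          -- Python raises IndexError here (only lenA = 0); excluded by Pre_
    | some v =>
      match m with
      | 0 => (m : Int)   -- i starts at -1: the while loop does not run (unreachable when lenA ≠ 0)
      | j+1 => solutionLoopA S v j (m : Int)
  else
    let m := lenA / 2
    match PySem.List.pyGet? S (m : Int) with
    | none => 0
    | some v => solutionLoopA S v m (m : Int)

-- ===== PORT B =====
-- 'for v in sorted(cnt): if cum + cnt[v] > m: return n - cum; cum += cnt[v]'
def solutionAltGo (cnt : PySem.Dict Int Int) (n m : Int) : List Int → Int → Int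
  | [], _ => 0         -- Python falls off and returns None; only reachable for A = [], excluded by Pre_
  | v :: ks, cum =>
      if cum + cnt.getD v 0 > m then n - cum
      else solutionAltGo cnt n m ks (cum + cnt.getD v 0)

def solution_alt (A : List Int) : Int :=
  let n : Int := A.length
  let m : Int := PySem.Int.floordiv n 2
  let cnt := A.foldl (fun d x => d.insert x (d.getD x 0 + 1)) (PySem.Dict.empty : PySem.Dict Int Int)
  solutionAltGo cnt n m (PySem.List.sorted cnt.keys (fun x => x) false) 0

-- ===== PRECONDITION & SPEC =====
-- Pre_ excludes only the empty list, on which Python A raises IndexError (and B returns None).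
def Pre_solution (A : List Int) : Prop := A ≠ []
instance (A : List Int) : Decidable (Pre_solution A) := by unfold Pre_solution; infer_instance
def pvWitness_solution : List Int := [3, 1, 2, 3]

def Spec_solution (A : List Int) (out : Int) : Prop := out = solution_alt A
instance (A : List Int) (out : Int) : Decidable (Spec_solution A out) := by unfold Spec_solution; infer_instance

-- ===== CLAIM (what is proved, stated in full; the proofs are below) =====
def Claim_equal_solution : Prop := ∀ (A : List Int), Dom_solution A → Pre_solution A → Spec_solution A (solution A)

-- ===== LEMMAS AND PROOFS =====

-- A's while loop counts, among indices 0..i, those holding v (plus the accumulator)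
theorem solutionLoopA_eq (S : List Int) (v : Int) (i : Nat) (hi : i < S.length) (c : Int) :
    solutionLoopA S v i c = c + ((S.take (i+1)).countP (fun x => x == v) : Int) := by
  induction i generalizing c with
  | zero =>
    have h0 : S[0]? = some (S[0]'hi) := List.getElem?_eq_getElem hi
    simp only [solutionLoopA, PySem.List.pyGet?_zero, List.take_add_one, List.take_zero,
      List.nil_append, h0, Option.toList_some, List.countP_cons, List.countP_nil]
    by_cases hv : S[0]'hi = v
    · simp [hv]
    · simp [hv]
  | succ i ih =>
    have hi' : i < S.length := by omega
    have hg : PySem.List.pyGet? S ((i : Int) + 1) = some (S[i+1]'hi) := by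
      have : ((i : Int) + 1) = ((i + 1 : Nat) : Int) := by push_cast; ring
      rw [this, PySem.List.pyGet?_natCast]
      exact List.getElem?_eq_getElem hi
    have hstep : (S.take (i+1+1)).countP (fun x => x == v)
        = (S.take (i+1)).countP (fun x => x == v) + (if S[i+1]'hi = v then 1 else 0) := by
      rw [List.take_add_one, List.countP_append, List.getElem?_eq_getElem hi]
      by_cases hv : S[i+1]'hi = v
      · simp [hv]
      · simp [hv]
    rw [solutionLoopA, ih hi', hg, hstep]
    by_cases hv : S[i+1]'hi = v
    · simp [hv]; ring
    · simp only [hv, if_false]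
      have : ¬ some (S[i+1]'hi) = some v := by simpa using hv
      simp [this]

-- splitting a disjoint disjunction of predicates under countP
theorem countP_or_disjoint {α : Type} (p q : α → Bool) (l : List α)
    (h : ∀ x ∈ l, ¬(p x = true ∧ q x = true)) :
    l.countP (fun x => p x || q x) = l.countP p + l.countP q := by
  induction l with
  | nil => simp
  | cons a t ih =>
    have ha := h a (by simp)
    have ht : ∀ x ∈ t, ¬(p x = true ∧ q x = true) := fun x hx => h x (by simp [hx])
    simp only [List.countP_cons, ih ht]
    by_cases hp : p a = true <;> by_cases hq : q a = true <;> simp_all <;> omega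

-- if every element is ≤ v, the elements split into "= v" and "< v"
theorem countP_le_split (v : Int) (l : List Int) (h : ∀ x ∈ l, x ≤ v) :
    l.countP (fun x => x == v) + l.countP (fun x => decide (x < v)) = l.length := by
  induction l with
  | nil => simp
  | cons a t ih =>
    have ha := h a (by simp)
    have ht : ∀ x ∈ t, x ≤ v := fun x hx => h x (by simp [hx])
    simp only [List.countP_cons, List.length_cons]
    rcases lt_or_eq_of_le ha with hlt | heq
    · have h1 : ¬ (a = v) := by omega
      simp only [beq_iff_eq, h1, hlt, decide_true]
      have := ih ht; simp_all; omega
    · have h2 : ¬ (a < v) := by omega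
      simp only [beq_iff_eq, heq]
      have := ih ht; simp_all; omega

-- everything strictly below v lives strictly before index k when indices ≥ k hold values ≥ v
theorem countP_lt_take (S : List Int) (v : Int) (k : Nat)
    (hge : ∀ j, (hj : j < S.length) → k ≤ j → v ≤ S[j]) :
    (S.take k).countP (fun x => decide (x < v)) = S.countP (fun x => decide (x < v)) := by
  conv_rhs => rw [← List.take_append_drop k S]
  rw [List.countP_append]
  have hdrop : (S.drop k).countP (fun x => decide (x < v)) = 0 := by
    rw [List.countP_eq_zero]
    intro x hx
    rcases List.mem_iff_getElem.mp hx with ⟨j, hj, rfl⟩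
    have hlen : k + j < S.length := by
      have := hj; rw [List.length_drop] at this; omega
    rw [List.getElem_drop]
    have := hge (k + j) hlen (by omega)
    simp; omega
  omega

-- the B loop over strictly increasing keys covering the tail of A's values
theorem solutionAltGo_eq (A : List Int) (cnt : PySem.Dict Int Int)
    (hcnt : ∀ k, cnt.getD k 0 = A.count k) (v : Int)
    (hL : A.countP (fun x => decide (x < v)) ≤ A.length / 2)
    (hU : A.length / 2 < A.countP (fun x => decide (x < v)) + A.count v) :
    ∀ ks : List Int, ks.Pairwise (· < ·) → v ∈ ks →
      (∀ x ∈ A, x ∉ ks → ∀ k ∈ ks, x < k) →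
      ∀ cum : Int, cum = (A.countP (fun x => decide (x ∉ ks)) : Int) →
      solutionAltGo cnt (A.length) ((A.length / 2 : Nat)) ks cum
        = (A.length : Int) - (A.countP (fun x => decide (x < v)) : Int) := by
  intro ks
  induction ks with
  | nil => intro _ hv; simp at hv
  | cons k t ih =>
    intro hp hv hco cum hcum
    have hhead : ∀ y ∈ t, k < y := fun y hy => (List.pairwise_cons.mp hp).1 y hy
    have hcum' : cum = (A.countP (fun x => decide (x < k)) : Int) := by
      rw [hcum]
      congr 1
      apply List.countP_congr
      intro x hx
      simp only [decide_eq_true_eq]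
      constructor
      · intro hxn; exact hco x hx hxn k (by simp)
      · intro hxk hmem
        rcases List.mem_cons.mp hmem with rfl | hxt
        · omega
        · exact absurd (hhead x hxt) (by omega)
    have hck : cnt.getD k 0 = (A.count k : Int) := hcnt k
    simp only [solutionAltGo]
    by_cases hbr : cum + cnt.getD k 0 > ((A.length / 2 : Nat) : Int)
    · rw [if_pos hbr]
      have hkv : k = v := by
        have hbrN : A.length / 2 < A.countP (fun x => decide (x < k)) + A.count k := by
          rw [hcum', hck] at hbr; exact_mod_cast hbr
        rcases lt_trichotomy k v with hlt | heq | hgt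
        · exfalso
          have hq : A.countP (fun x => decide (x = k)) = A.count k := by
            rw [List.count_eq_countP]; apply List.countP_congr; intro x hx; simp
          have hsum : A.countP (fun x => decide (x < k)) + A.count k
              = A.countP (fun x => decide (x < k) || decide (x = k)) := by
            rw [countP_or_disjoint _ _ A (by
              intro x hx
              simp only [decide_eq_true_eq]
              rintro ⟨h1, rfl⟩
              exact lt_irrefl _ h1), hq]
          have hmono : A.countP (fun x => decide (x < k) || decide (x = k))
              ≤ A.countP (fun x => decide (x < v)) := by
            apply List.countP_mono_left; intro x hx; simp; omega
          omega
        · exact heq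
        · exfalso
          rcases List.mem_cons.mp hv with rfl | hvt
          · omega
          · exact absurd (hhead v hvt) (by omega)
      rw [hcum', hkv]
    · rw [if_neg hbr]
      have hbrN : A.countP (fun x => decide (x < k)) + A.count k ≤ A.length / 2 := by
        rw [hcum', hck] at hbr
        have hbr2 := not_lt.mp hbr
        exact_mod_cast hbr2
      have hkv : k ≠ v := by
        intro rfl_; subst rfl_; omega
      have hvt : v ∈ t := by
        rcases List.mem_cons.mp hv with rfl | h
        · exact absurd rfl hkv
        · exact h
      have hknt : k ∉ t := fun h => absurd (hhead k h) (by omega)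
      apply ih (List.Pairwise.of_cons hp) hvt
      · intro x hx hxt k' hk'
        by_cases hxk : x = k
        · subst hxk; exact hhead k' hk'
        · exact hco x hx (by simp [hxk, hxt]) k' (List.mem_cons_of_mem _ hk')
      · rw [hcum', hck]
        have hnat : A.countP (fun x => decide (x ∉ t))
            = A.countP (fun x => decide (x < k)) + A.count k := by
          have hcg : A.countP (fun x => decide (x ∉ t))
              = A.countP (fun x => decide (x ∉ (k :: t)) || decide (x = k)) := by
            apply List.countP_congr
            intro x hx
            simp only [decide_eq_true_eq, Bool.or_eq_true]
            constructor
            · intro hxt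
              by_cases hxk : x = k
              · right; exact hxk
              · left; simp [hxk, hxt]
            · rintro (hxn | rfl)
              · intro hmemt; exact hxn (List.mem_cons_of_mem _ hmemt)
              · exact hknt
          rw [hcg, countP_or_disjoint _ _ A (by
            intro x hx
            simp only [decide_eq_true_eq]
            rintro ⟨h1, rfl⟩
            exact h1 (by simp))]
          have h1 : A.countP (fun x => decide (x ∉ (k :: t))) = A.countP (fun x => decide (x < k)) := by
            have := hcum'.symm.trans hcum
            exact_mod_cast this.symm
          have h2 : A.countP (fun x => decide (x = k)) = A.count k := by
            rw [List.count_eq_countP]; apply List.countP_congr; intro x hx; simp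
          omega
        rw [hnat]; push_cast; ring

-- ===== VERDICT (by name: the statement is the Claim_ definition above) =====
theorem solution_spec : Claim_equal_solution := by
  intro A _hdom hpre
  unfold Spec_solution
  have hn0 : A.length ≠ 0 := fun h => hpre (List.eq_nil_of_length_eq_zero h)
  obtain ⟨S, hS⟩ : ∃ S, PySem.List.sorted A (fun x => x) false = S := ⟨_, rfl⟩
  have hlenS : S.length = A.length := by
    rw [← hS]; exact PySem.List.length_sorted A (fun x => x) false
  have hm : A.length / 2 < S.length := by rw [hlenS]; omega
  have hperm : S.Perm A := by rw [← hS]; exact PySem.List.sorted_perm A (fun x => x) false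
  have hmono : ∀ p q : Nat, (hq : q < S.length) → (hpq : p ≤ q) →
      S[p]'(Nat.lt_of_le_of_lt hpq hq) ≤ S[q] := by
    subst hS; intro p q hq hpq
    exact PySem.List.sorted_id_getElem_mono A hpq hq
  have hvget : PySem.List.pyGet? S ((A.length / 2 : Nat) : Int) = some (S[A.length / 2]'hm) := by
    rw [PySem.List.pyGet?_natCast]
    exact List.getElem?_eq_getElem hm
  -- counting facts about the median value v := S[A.length/2]
  have hLS : S.countP (fun x => decide (x < S[A.length / 2]'hm))
      = A.countP (fun x => decide (x < S[A.length / 2]'hm)) := hperm.countP_eq _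
  have hge : ∀ k : Nat, A.length / 2 ≤ k →
      ∀ j, (hj : j < S.length) → k ≤ j → (S[A.length / 2]'hm) ≤ S[j] :=
    fun k hk j hj hkj => hmono (A.length / 2) j hj (by omega)
  have htk : ∀ k : Nat, A.length / 2 ≤ k →
      (S.take k).countP (fun x => decide (x < S[A.length / 2]'hm))
        = A.countP (fun x => decide (x < S[A.length / 2]'hm)) := by
    intro k hk
    rw [countP_lt_take S _ k (hge k hk), hLS]
  have hle : ∀ k : Nat, k ≤ A.length / 2 + 1 → ∀ x ∈ S.take k, x ≤ S[A.length / 2]'hm := by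
    intro k hk x hx
    rcases List.mem_iff_getElem.mp hx with ⟨j, hj, rfl⟩
    rw [List.length_take] at hj
    have hjlen : j < S.length := by omega
    have hjm : j ≤ A.length / 2 := by omega
    rw [List.getElem_take]
    exact hmono j (A.length / 2) hm hjm
  have hsplit : ∀ k : Nat, k ≤ A.length / 2 + 1 → k ≤ S.length →
      A.length / 2 ≤ k →
      (S.take k).countP (fun x => x == S[A.length / 2]'hm)
        = k - A.countP (fun x => decide (x < S[A.length / 2]'hm)) ∧
      A.countP (fun x => decide (x < S[A.length / 2]'hm)) ≤ k := by
    intro k hk hkl hck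
    have h1 := countP_le_split (S[A.length / 2]'hm) (S.take k) (hle k hk)
    have h3 : (S.take k).length = k := by rw [List.length_take]; omega
    rw [htk k hck] at h1
    omega
  have hLle : A.countP (fun x => decide (x < S[A.length / 2]'hm)) ≤ A.length / 2 :=
    (hsplit (A.length / 2) (by omega) (by omega) (by omega)).2
  have hCnt1 : (S.take (A.length / 2)).countP (fun x => x == S[A.length / 2]'hm)
      = A.length / 2 - A.countP (fun x => decide (x < S[A.length / 2]'hm)) :=
    (hsplit (A.length / 2) (by omega) (by omega) (by omega)).1
  have hCnt2 : (S.take (A.length / 2 + 1)).countP (fun x => x == S[A.length / 2]'hm)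
      = A.length / 2 + 1 - A.countP (fun x => decide (x < S[A.length / 2]'hm)) :=
    (hsplit (A.length / 2 + 1) (by omega) (by omega) (by omega)).1
  have hUb : A.length / 2 < A.countP (fun x => decide (x < S[A.length / 2]'hm))
      + A.count (S[A.length / 2]'hm) := by
    have hsub : (S.take (A.length / 2 + 1)).countP (fun x => x == S[A.length / 2]'hm)
        ≤ S.countP (fun x => x == S[A.length / 2]'hm) :=
      (List.take_sublist _ _).countP_le
    have hcc : S.countP (fun x => x == S[A.length / 2]'hm) = A.count (S[A.length / 2]'hm) := by
      rw [← List.count_eq_countP]; exact hperm.count_eq _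
    omega
  -- B side
  have hvA : (S[A.length / 2]'hm) ∈ A := hperm.mem_iff.mp (List.getElem_mem hm)
  obtain ⟨ks, hks⟩ : ∃ ks, PySem.List.sorted (PySem.Set.ofList A) (fun x => x) false = ks := ⟨_, rfl⟩
  have hksP : ks.Pairwise (· < ·) := by rw [← hks]; exact PySem.List.sorted_ofList_pairwise_lt A
  have hmemks : ∀ x : Int, x ∈ ks ↔ x ∈ A := by
    intro x; rw [← hks, PySem.List.mem_sorted, PySem.Set.mem_ofList]
  have hB : solution_alt A = (A.length : Int)
      - (A.countP (fun x => decide (x < S[A.length / 2]'hm)) : Int) := by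
    simp only [solution_alt]
    rw [PySem.Dict.foldl_insert_getD_add_one_eq_counter, PySem.Dict.keys_counter]
    have hfd : PySem.Int.floordiv (A.length : Int) 2 = ((A.length / 2 : Nat) : Int) := by
      exact_mod_cast PySem.Int.floordiv_natCast A.length 2
    rw [hfd, hks]
    exact solutionAltGo_eq A _ (PySem.Dict.getD_counter A) _ hLle hUb ks hksP
      ((hmemks _).mpr hvA)
      (fun x hx hnx k hk => absurd ((hmemks x).mpr hx) hnx)
      0 (by
        rw [List.countP_eq_zero.mpr (by
          intro x hx
          simp only [decide_eq_true_eq, not_not]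
          exact (hmemks x).mpr hx)]
        simp)
  -- A side
  have hA : solution A = (A.length : Int)
      - (A.countP (fun x => decide (x < S[A.length / 2]'hm)) : Int) := by
    obtain ⟨v, hveq⟩ : ∃ v, S[A.length / 2]'hm = v := ⟨_, rfl⟩
    rw [hveq] at hvget hCnt1 hCnt2 hLle ⊢
    simp only [solution]
    rw [hS, hvget]
    by_cases hpar : A.length % 2 = 0
    · rw [if_pos (by simpa using hpar)]
      obtain ⟨j, hj⟩ : ∃ j, A.length / 2 = j + 1 := ⟨A.length / 2 - 1, by omega⟩
      rw [hj]
      show solutionLoopA S v j ((j : Int) + 1)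
          = (A.length : Int) - (A.countP (fun x => decide (x < v)) : Int)
      have hjlt : j < S.length := by omega
      rw [solutionLoopA_eq S v j hjlt]
      rw [← hj, hCnt1]
      omega
    · rw [if_neg (by simpa using hpar)]
      show solutionLoopA S v (A.length / 2) ((A.length / 2 : Nat) : Int)
          = (A.length : Int) - (A.countP (fun x => decide (x < v)) : Int)
      rw [solutionLoopA_eq S v (A.length / 2) hm]
      rw [hCnt2]
      omega
  rw [hA, hB]
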